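-- pv_equiv track=rewrite | github.com/chenxy3791/algorithm_puzzles | Q20-shounan-limian-mofangzhen.py | shouNanMoFang3
-- ===== SOURCE A (Python) =====
-- from   typing import List
--
-- def shouNanMoFang3(nums: List):
--     totalSum     = sum(nums)
--     targetCnt    = [0] * (totalSum + 1)
--     targetCnt[0] = 1
--
--     for n in nums:
--         for i in range(totalSum - n, -1, -1):
--             targetCnt[i + n] += targetCnt[i]
--
--     maxtargetCnt = max(targetCnt)
--     return targetCnt.index(maxtargetCnt),maxtargetCnt
-- ===== SOURCE B (Python) =====
-- def shouNanMoFang3(nums):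
--     # Brute-force: enumerate all 2^n subset sums, tally them in a dict,
--     # then take the most frequent sum (smallest such sum on ties) and its count.
--     sums = [0]
--     for n in nums:
--         sums = sums + [s + n for s in sums]
--     cnt = {}
--     for s in sums:
--         cnt[s] = cnt.get(s, 0) + 1
--     maxCnt = max(cnt.values())
--     best = min(s for s, c in cnt.items() if c == maxCnt)
--     return best, maxCnt
-- ===== Notes on version B (the rewrite author's own statement) =====
-- stated objective: alternative
-- what changed: Replaces the pseudo-polynomial in-place array DP (array of size sum+1 updated by a reverse inner loop, then max/index over the array) with brute-force enumeration of all 2^n subset sums tallied into a dict, taking the max count and the smallest sum attaining it.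
-- crash fix: On any input containing a negative number A raises IndexError (the DP array is sized by the total sum and then indexed out of range); B returns the most frequent subset sum (smallest on ties) and its count. — e.g. on shouNanMoFang3([-1]): A raises IndexError, B returns (-1, 1)
import Mathlib
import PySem

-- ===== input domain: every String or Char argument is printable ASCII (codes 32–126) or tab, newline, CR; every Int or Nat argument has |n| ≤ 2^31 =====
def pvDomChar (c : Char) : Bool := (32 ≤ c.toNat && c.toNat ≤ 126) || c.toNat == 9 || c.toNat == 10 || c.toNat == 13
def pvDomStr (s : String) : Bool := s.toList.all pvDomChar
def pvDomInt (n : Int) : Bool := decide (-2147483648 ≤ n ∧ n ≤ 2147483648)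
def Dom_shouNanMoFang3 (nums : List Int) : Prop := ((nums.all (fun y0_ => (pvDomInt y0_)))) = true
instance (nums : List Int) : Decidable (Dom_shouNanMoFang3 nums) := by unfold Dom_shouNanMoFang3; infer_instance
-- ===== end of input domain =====

-- B replaces A's in-place array DP (return-value equivalence) by brute-force
-- enumeration of all subset sums tallied in a dict (objective: alternative; not faster).

-- ===== PORT A =====
-- A's inner 'for i in range(totalSum - n, -1, -1)' loop, kept as a helper.
-- Under Pre_ (all elements ≥ 0) every index the Python code touches is nonnegative and
-- in range, so pySetD/pyGetD here are exact for Python's list assignment/read.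
def pvInner (totalSum : Int) (arr : List Int) (n : Int) : List Int :=
  (PySem.List.pyRange (totalSum - n) (-1) (-1)).foldl
    (fun arr i => PySem.List.pySetD arr (i + n)
      (PySem.List.pyGetD arr (i + n) 0 + PySem.List.pyGetD arr i 0)) arr

def shouNanMoFang3 (nums : List Int) : Int × Int :=
  let totalSum := nums.sum
  let targetCnt := PySem.List.pyRepeat [(0 : Int)] (totalSum + 1)
  let targetCnt := PySem.List.pySetD targetCnt 0 1
  let targetCnt := nums.foldl (pvInner totalSum) targetCnt
  let maxtargetCnt := (PySem.List.max? targetCnt (fun x => x)).getD 0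
  ((((PySem.List.index? targetCnt maxtargetCnt).getD 0 : Nat) : Int), maxtargetCnt)

-- ===== PORT B =====
-- sums = [0]; for n in nums: sums = sums + [s + n for s in sums]
def altSums (nums : List Int) : List Int :=
  nums.foldl (fun acc n => acc ++ acc.map (fun s => s + n)) [0]

def shouNanMoFang3_alt (nums : List Int) : Int × Int :=
  let sums := altSums nums
  let cnt := sums.foldl (fun d s => d.insert s (d.getD s 0 + 1)) PySem.Dict.empty
  let maxCnt := (PySem.List.max? cnt.values (fun x => x)).getD 0
  let best := (PySem.List.min?
      ((cnt.items.filter (fun p => p.2 == maxCnt)).map (fun p => p.1)) (fun x => x)).getD 0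
  (best, maxCnt)

-- ===== PRECONDITION & SPEC =====
-- A raises IndexError whenever some element is negative (the DP array is sized by the
-- total sum and is then indexed out of range); Pre_ excludes exactly those inputs.
def Pre_shouNanMoFang3 (nums : List Int) : Prop := ∀ x ∈ nums, 0 ≤ x
instance (nums : List Int) : Decidable (Pre_shouNanMoFang3 nums) := by unfold Pre_shouNanMoFang3; infer_instance
def pvWitness_shouNanMoFang3 : List Int := [1, 2, 2]

-- On any input containing a negative number A raises IndexError; B returns the most
-- frequent subset sum (smallest on ties) and its count.
def Raises_shouNanMoFang3 (nums : List Int) : Prop := ∃ x ∈ nums, x < 0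
instance (nums : List Int) : Decidable (Raises_shouNanMoFang3 nums) := by unfold Raises_shouNanMoFang3; infer_instance
def pvRaiseWitness_shouNanMoFang3 : List Int := [-1]
def pvRaiseWitnessOut_shouNanMoFang3 : Int × Int := (-1, 1)

def Spec_shouNanMoFang3 (nums : List Int) (out : Int × Int) : Prop := out = shouNanMoFang3_alt nums
instance (nums : List Int) (out : Int × Int) : Decidable (Spec_shouNanMoFang3 nums out) := by unfold Spec_shouNanMoFang3; infer_instance

-- ===== CLAIM (what is proved, stated in full; the proofs are below) =====
def Claim_equal_shouNanMoFang3 : Prop := ∀ (nums : List Int), Dom_shouNanMoFang3 nums → Pre_shouNanMoFang3 nums → Spec_shouNanMoFang3 nums (shouNanMoFang3 nums)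
def Claim_raises_shouNanMoFang3 : Prop := (∀ (nums : List Int), Dom_shouNanMoFang3 nums → Raises_shouNanMoFang3 nums → ¬ Pre_shouNanMoFang3 nums) ∧ (Dom_shouNanMoFang3 (pvRaiseWitness_shouNanMoFang3) ∧ Raises_shouNanMoFang3 (pvRaiseWitness_shouNanMoFang3) ∧ shouNanMoFang3_alt (pvRaiseWitness_shouNanMoFang3) = pvRaiseWitnessOut_shouNanMoFang3)

-- ===== LEMMAS AND PROOFS =====

lemma altSums_append (p : List Int) (n : Int) :
    altSums (p ++ [n]) = altSums p ++ (altSums p).map (fun s => s + n) := by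
  simp [altSums, List.foldl_append]
lemma count_altSums_append (p : List Int) (n s : Int) :
    (altSums (p ++ [n])).count s = (altSums p).count s + (altSums p).count (s - n) := by
  rw [altSums_append, List.count_append]
  congr 1
  have := List.count_map_of_injective (altSums p) (fun s => s + n)
    (fun a b h => by simpa using h) (s - n)
  simpa using this
lemma zero_mem_altSums (p : List Int) : (0 : Int) ∈ altSums p := by
  induction p using List.reverseRecOn with
  | nil => simp [altSums]
  | append_singleton p n ih => rw [altSums_append]; exact List.mem_append_left _ ih
lemma mem_altSums_bounds (p : List Int) (hp : ∀ x ∈ p, 0 ≤ x) :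
    ∀ x ∈ altSums p, 0 ≤ x ∧ x ≤ p.sum := by
  induction p using List.reverseRecOn with
  | nil => intro x hx; simp [altSums] at hx; simp [hx]
  | append_singleton p n ih =>
    intro x hx
    have hn : 0 ≤ n := hp n (by simp)
    have hp' : ∀ y ∈ p, 0 ≤ y := fun y hy => hp y (by simp [hy])
    rw [altSums_append] at hx
    rcases List.mem_append.mp hx with h | h
    · have := ih hp' x h; simp; omega
    · obtain ⟨y, hy, rfl⟩ := List.mem_map.mp h
      have := ih hp' y hy; simp; omega

lemma inner_loop (N : Nat) :
    ∀ (k : Nat) (arr : List Int), (k : Int) - 1 + N < arr.length →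
    ∀ (j : Nat),
      PySem.List.pyGetD ((PySem.List.pyRange ((k : Int) - 1) (-1) (-1)).foldl
        (fun arr i => PySem.List.pySetD arr (i + (N : Int))
          (PySem.List.pyGetD arr (i + (N : Int)) 0 + PySem.List.pyGetD arr i 0)) arr) (j : Int) 0
      = PySem.List.pyGetD arr (j : Int) 0 +
          (if (N : Int) ≤ (j : Int) ∧ (j : Int) ≤ (k : Int) - 1 + N
             then PySem.List.pyGetD arr ((j : Int) - N) 0 else 0) := by
  intro k
  induction k with
  | zero =>
    intro arr hlen j
    rw [PySem.List.pyRange_neg_one_eq_nil (by omega)]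
    simp only [List.foldl_nil]
    rw [if_neg (by omega)]
    ring
  | succ k ih =>
    intro arr hlen j
    have e : ((k + 1 : Nat) : Int) - 1 = (k : Int) := by push_cast; ring
    rw [e] at hlen ⊢
    rw [PySem.List.pyRange_neg_one_cons (by omega)]
    simp only [List.foldl_cons]
    have ekN : (k : Int) + (N : Int) = ((k + N : Nat) : Int) := by push_cast; ring
    rw [ekN]
    set v := PySem.List.pyGetD arr ((k + N : Nat) : Int) 0 + PySem.List.pyGetD arr ((k : Nat) : Int) 0 with hv
    set arr' := PySem.List.pySetD arr ((k + N : Nat) : Int) v with harr'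
    have hkN : k + N < arr.length := by omega
    have hlen' : ((k : Nat) : Int) - 1 + N < arr'.length := by
      rw [harr', PySem.List.length_pySetD]; omega
    have hset : ∀ (m : Nat), PySem.List.pyGetD arr' (m : Int) 0
        = if m = k + N then v else PySem.List.pyGetD arr (m : Int) 0 := by
      intro m
      rw [harr', PySem.List.pyGetD_pySetD_natCast arr (k+N) m v 0 hkN]
    rw [ih arr' hlen' j, hset j]
    by_cases hj : j = k + N
    · subst hj
      rw [if_pos rfl, if_neg (by push_cast; omega), if_pos (by push_cast; omega)]
      have h3 : ((k + N : Nat) : Int) - (N : Int) = ((k : Nat) : Int) := by push_cast; ring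
      rw [h3, hv]
      ring
    · rw [if_neg hj]
      by_cases hcond : (N : Int) ≤ (j : Int) ∧ (j : Int) ≤ ((k : Nat) : Int) - 1 + N
      · rw [if_pos hcond, if_pos (by omega)]
        have hNj : N ≤ j := by exact_mod_cast hcond.1
        have hji : ((j : Nat) : Int) - (N : Int) = ((j - N : Nat) : Int) := by push_cast [hNj]; ring
        rw [hji, hset (j - N), if_neg (by omega)]
      · rw [if_neg hcond, if_neg (by push_cast at hcond ⊢; omega)]

lemma inner_length (T : Int) (n : Int) (arr : List Int) :
    (pvInner T arr n).length = arr.length := by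
  unfold pvInner
  generalize PySem.List.pyRange (T - n) (-1) (-1) = l
  induction l generalizing arr with
  | nil => rfl
  | cons a t ih => simp only [List.foldl_cons]; rw [ih, PySem.List.length_pySetD]

lemma outer_loop (T : Int) (hT : 0 ≤ T) (p : List Int) (hp : ∀ x ∈ p, 0 ≤ x)
    (hsum : p.sum ≤ T) :
    (p.foldl (pvInner T) (PySem.List.pySetD (PySem.List.pyRepeat [(0 : Int)] (T + 1)) 0 1)).length = (T + 1).toNat ∧
    ∀ j : Nat, (j : Int) ≤ T →
      PySem.List.pyGetD (p.foldl (pvInner T) (PySem.List.pySetD (PySem.List.pyRepeat [(0 : Int)] (T + 1)) 0 1)) (j : Int) 0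
        = ((altSums p).count (j : Int) : Int) := by
  induction p using List.reverseRecOn with
  | nil =>
    constructor
    · simp only [List.foldl_nil, PySem.List.length_pySetD, PySem.List.pyRepeat_singleton,
        List.length_replicate]
    · intro j hj
      simp only [List.foldl_nil, PySem.List.pyRepeat_singleton]
      have h0 : (0 : Nat) < (List.replicate (T+1).toNat (0:Int)).length := by
        simp only [List.length_replicate]; omega
      have := PySem.List.pyGetD_pySetD_natCast (List.replicate (T+1).toNat (0:Int)) 0 j (1:Int) 0 (by simpa using h0)
      simp only [Nat.cast_zero] at this
      rw [this]
      have hrep : PySem.List.pyGetD (List.replicate (T+1).toNat (0:Int)) (j : Int) 0 = 0 := by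
        rw [PySem.List.pyGetD_of_nonneg _ _ (by positivity)]
        simp only [List.getD_eq_getElem?_getD, List.getElem?_getD_replicate_default_eq]
      rw [hrep]
      show _ = ((List.count ((j:Nat):Int) (altSums [])) : Int)
      simp only [altSums, List.foldl_nil]
      by_cases hj0 : j = 0
      · subst hj0; simp
      · rw [if_neg hj0]
        have hc0 : List.count ((j:Nat):Int) [(0:Int)] = 0 :=
          List.count_eq_zero.mpr (by simp; omega)
        simp [hc0]
  | append_singleton p n ih =>
    have hn : 0 ≤ n := hp n (by simp)
    have hp' : ∀ y ∈ p, 0 ≤ y := fun y hy => hp y (by simp [hy])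
    have hps : 0 ≤ p.sum := List.sum_nonneg hp'
    have hsum' : p.sum ≤ T := by simp at hsum; omega
    have hnT : n ≤ T := by simp at hsum; omega
    obtain ⟨ihlen, ihget⟩ := ih hp' hsum'
    rw [List.foldl_append]
    set arrp := p.foldl (pvInner T) (PySem.List.pySetD (PySem.List.pyRepeat [(0 : Int)] (T + 1)) 0 1) with harrp
    constructor
    · rw [List.foldl_cons, List.foldl_nil, inner_length, ihlen]
    · intro j hj
      rw [List.foldl_cons, List.foldl_nil]
      set N := n.toNat with hN
      have hNn : (N : Int) = n := Int.toNat_of_nonneg hn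
      set k := (T - n + 1).toNat with hk
      have hkc : (k : Int) - 1 = T - n := by
        rw [hk, Int.toNat_of_nonneg (by omega)]; ring
      have hlenc : (k : Int) - 1 + N < (arrp.length : Int) := by
        rw [hkc, hNn, ihlen]; rw [Int.toNat_of_nonneg (by omega)]; omega
      have key := inner_loop N k arrp hlenc j
      have erange : PySem.List.pyRange ((k:Int) - 1) (-1) (-1) = PySem.List.pyRange (T - n) (-1) (-1) := by rw [hkc]
      rw [erange, hNn] at key
      unfold pvInner
      rw [key, hkc]
      have eT : T - n + n = T := by ring
      rw [eT, count_altSums_append]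
      push_cast
      rw [ihget j hj]
      by_cases hc : n ≤ (j : Int)
      · rw [if_pos ⟨hc, by omega⟩]
        have hjN : N ≤ j := by omega
        have e2 : (j : Int) - n = ((j - N : Nat) : Int) := by push_cast [hjN]; omega
        rw [e2, ihget (j - N) (by push_cast; omega)]
      · rw [if_neg (by omega)]
        have hzero : (altSums p).count ((j:Int) - n) = 0 := by
          apply List.count_eq_zero.mpr
          intro hmem
          have := mem_altSums_bounds p hp' _ hmem
          omega
        rw [hzero]
        ring

lemma shouNanMoFang3_eq_alt (nums : List Int) (hpre : ∀ x ∈ nums, 0 ≤ x) :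
    shouNanMoFang3 nums = shouNanMoFang3_alt nums := by
  have hT : 0 ≤ nums.sum := List.sum_nonneg hpre
  obtain ⟨hlen, hget⟩ := outer_loop nums.sum hT nums hpre le_rfl
  set T := nums.sum with hTdef
  set sums := altSums nums with hsums
  set arr := nums.foldl (pvInner T) (PySem.List.pySetD (PySem.List.pyRepeat [(0 : Int)] (T + 1)) 0 1) with harr
  -- basic facts
  have h0mem : (0 : Int) ∈ sums := zero_mem_altSums nums
  have hbounds : ∀ x ∈ sums, 0 ≤ x ∧ x ≤ T := mem_altSums_bounds nums hpre
  have hgetel : ∀ (j : Nat) (hj : j < arr.length),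
      PySem.List.pyGetD arr (j : Int) 0 = arr[j] := by
    intro j hj
    rw [PySem.List.pyGetD_eq_getElem arr 0 (by positivity) (by exact_mod_cast hj)]
    simp
  have hgetmem : ∀ j : Nat, (j : Int) ≤ T → ((sums.count ((j : Nat) : Int) : Int)) ∈ arr := by
    intro j hj
    have hjlt : j < (T + 1).toNat := by
      have : ((T + 1).toNat : Int) = T + 1 := Int.toNat_of_nonneg (by omega)
      omega
    rw [← hget j hj, hgetel j (by rw [hlen]; omega)]
    exact List.getElem_mem _
  have helem : ∀ e ∈ arr, ∃ j : Nat, (j : Int) ≤ T ∧ e = (sums.count ((j : Nat) : Int) : Int) := by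
    intro e he
    obtain ⟨i, hi, hie⟩ := List.mem_iff_getElem.mp he
    refine ⟨i, by rw [hlen] at hi; omega, ?_⟩
    rw [← hget i (by rw [hlen] at hi; omega), hgetel i hi, hie]
  -- A's max
  have harrne : arr ≠ [] := by
    intro h
    have := hlen
    rw [h] at this
    simp at this
    omega
  obtain ⟨m, hm⟩ : ∃ m, PySem.List.max? arr (fun x => x) = some m := by
    cases hmm : PySem.List.max? arr (fun x => x) with
    | none => exact absurd ((PySem.List.max?_eq_none_iff _ _).mp hmm) harrne
    | some m => exact ⟨m, rfl⟩
  have hub : ∀ y ∈ arr, y ≤ m := PySem.List.max?_isMax hm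
  have hm1 : 1 ≤ m := by
    have h1 : 0 < List.count (0 : Int) sums := List.count_pos_iff.mpr h0mem
    have h2 := hub _ (hgetmem 0 (by omega))
    push_cast at h2
    omega
  -- B's dict is Counter(sums)
  have hcnt : sums.foldl (fun d s => d.insert s (d.getD s 0 + 1)) PySem.Dict.empty
      = PySem.Dict.counter sums := PySem.Dict.foldl_insert_getD_add_one_eq_counter sums
  have hvals : (PySem.Dict.counter sums).values
      = (PySem.Set.ofList sums).map (fun k => (sums.count k : Int)) := by
    show ((PySem.Dict.counter sums).items).map (fun p => p.2) = _
    rw [PySem.Dict.items_counter, List.map_map]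
    rfl
  obtain ⟨mc, hmc⟩ : ∃ mc, PySem.List.max? ((PySem.Set.ofList sums).map (fun k => (sums.count k : Int))) (fun x => x) = some mc := by
    cases hmm : PySem.List.max? ((PySem.Set.ofList sums).map (fun k => (sums.count k : Int))) (fun x => x) with
    | none =>
      have hnil := (PySem.List.max?_eq_none_iff _ _).mp hmm
      have : (0 : Int) ∈ PySem.Set.ofList sums := (PySem.Set.mem_ofList sums 0).mpr h0mem
      have : ((sums.count (0:Int) : Int)) ∈ (PySem.Set.ofList sums).map (fun k => (sums.count k : Int)) :=
        List.mem_map_of_mem this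
      rw [hnil] at this
      exact absurd this (by simp)
    | some mc => exact ⟨mc, rfl⟩
  have hmcm : mc = m := by
    have hle1 : mc ≤ m := by
      have hmcmem := PySem.List.max?_mem hmc
      obtain ⟨k, hk, hke⟩ := List.mem_map.mp hmcmem
      have hks : k ∈ sums := (PySem.Set.mem_ofList sums k).mp hk
      obtain ⟨hk0, hkT⟩ := hbounds k hks
      have hkc : ((k.toNat : Nat) : Int) = k := Int.toNat_of_nonneg hk0
      have := hgetmem k.toNat (by omega)
      rw [hkc] at this
      have := hub _ this
      omega
    have hle2 : m ≤ mc := by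
      obtain ⟨j0, hj0T, hj0e⟩ := helem m (PySem.List.max?_mem hm)
      have hj0s : ((j0 : Nat) : Int) ∈ sums := by
        apply List.count_pos_iff.mp
        omega
      have hmem : ((sums.count ((j0:Nat):Int) : Int)) ∈ (PySem.Set.ofList sums).map (fun k => (sums.count k : Int)) :=
        List.mem_map_of_mem ((PySem.Set.mem_ofList sums _).mpr hj0s)
      have := PySem.List.max?_isMax hmc _ hmem
      omega
    omega
  rw [hmcm] at hmc
  -- A's index
  obtain ⟨k0, hk0⟩ : ∃ k0, PySem.List.index? arr m = some k0 := by
    have := (PySem.List.index?_isSome_iff arr m).mpr (PySem.List.max?_mem hm)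
    exact Option.isSome_iff_exists.mp this
  obtain ⟨hk0lt, hk0val, hk0first⟩ := PySem.List.getElem_of_index?_eq_some hk0
  have hk0T : (k0 : Int) ≤ T := by rw [hlen] at hk0lt; omega
  have hcountk0 : (sums.count ((k0:Nat):Int) : Int) = m := by
    rw [← hget k0 hk0T, hgetel k0 hk0lt]
    exact hk0val
  have hk0s : ((k0:Nat):Int) ∈ sums := by
    apply List.count_pos_iff.mp
    omega
  -- the filtered key list
  have hflt : ((PySem.Dict.counter sums).items.filter (fun p => p.2 == m)).map (fun p => p.1)
      = ((PySem.Set.ofList sums).filter (fun k => (sums.count k : Int) == m)).map id := by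
    rw [PySem.Dict.items_counter, List.filter_map, List.map_map]
    rfl
  have hk0flt : ((k0:Nat):Int) ∈ ((PySem.Set.ofList sums).filter (fun k => (sums.count k : Int) == m)).map id := by
    rw [List.map_id]
    refine List.mem_filter.mpr ⟨(PySem.Set.mem_ofList sums _).mpr hk0s, ?_⟩
    rw [beq_iff_eq, hcountk0]
  obtain ⟨b, hb⟩ : ∃ b, PySem.List.min? (((PySem.Set.ofList sums).filter (fun k => (sums.count k : Int) == m)).map id) (fun x => x) = some b := by
    cases hmm : PySem.List.min? (((PySem.Set.ofList sums).filter (fun k => (sums.count k : Int) == m)).map id) (fun x => x) with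
    | none =>
      have hnil := (PySem.List.min?_eq_none_iff _ _).mp hmm
      rw [hnil] at hk0flt
      exact absurd hk0flt (by simp)
    | some b => exact ⟨b, rfl⟩
  have hbk0 : b = ((k0:Nat):Int) := by
    have hbmem := PySem.List.min?_mem hb
    rw [List.map_id] at hbmem
    obtain ⟨hbof, hbc⟩ := List.mem_filter.mp hbmem
    have hbs : b ∈ sums := (PySem.Set.mem_ofList sums b).mp hbof
    obtain ⟨hb0, hbT⟩ := hbounds b hbs
    have hbcv : (sums.count b : Int) = m := by
      have := beq_iff_eq.mp hbc; omega
    have hbtc : ((b.toNat : Nat) : Int) = b := Int.toNat_of_nonneg hb0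
    have hbTn : b.toNat < (T + 1).toNat := by omega
    have harrb : arr[b.toNat]'(by rw [hlen]; omega) = m := by
      have h3 := hget b.toNat (by omega)
      rw [hgetel b.toNat (by rw [hlen]; omega)] at h3
      rw [hbtc] at h3
      rw [h3]
      exact hbcv
    have hk0le : k0 ≤ b.toNat := by
      by_contra hlt
      exact hk0first b.toNat (by omega) harrb
    have := PySem.List.min?_isMin hb _ hk0flt
    omega
  -- assembling
  simp only [shouNanMoFang3, shouNanMoFang3_alt]
  rw [← hTdef, ← harr, ← hsums]
  rw [hm]
  simp only [Option.getD_some, hcnt, hvals, hmc]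
  rw [hk0]
  simp only [Option.getD_some, hflt, hb, hbk0]

-- ===== VERDICT (by name: the statement is the Claim_ definition above) =====
theorem shouNanMoFang3_spec : Claim_equal_shouNanMoFang3 := by
  intro nums _ hpre
  unfold Spec_shouNanMoFang3
  exact shouNanMoFang3_eq_alt nums hpre

theorem shouNanMoFang3_raises : Claim_raises_shouNanMoFang3 := by
  unfold Claim_raises_shouNanMoFang3
  refine ⟨?_, by decide⟩
  intro nums _ ⟨x, hx, hneg⟩ hpre
  exact absurd (hpre x hx) (by omega)

-- the file's two claims, delivered together
theorem shouNanMoFang3_claims_ok : Claim_equal_shouNanMoFang3 ∧ Claim_raises_shouNanMoFang3 :=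
  ⟨shouNanMoFang3_spec, shouNanMoFang3_raises⟩
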